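-- pv_equiv track=rewrite | github.com/nod-ai/amd-shark-ai | amdsharktuner/dispatch_tuner/gemm_intensity_number.py | _map_dim_roles
-- ===== SOURCE A (Python) =====
-- from typing import Dict
--
-- def _map_dim_roles(
--     symbols: list[str],
--     lhs_map: list[str],
--     rhs_map: list[str],
--     out_map: list[str],
-- ) -> Dict[str, list[int]]:
--     lhs_set = set(lhs_map)
--     rhs_set = set(rhs_map)
--     out_set = set(out_map)
--
--     k_syms = sorted((lhs_set & rhs_set) - out_set, key=symbols.index)
--     m_syms = sorted((out_set & lhs_set) - rhs_set, key=symbols.index)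
--     n_syms = sorted((out_set & rhs_set) - lhs_set, key=symbols.index)
--
--     return {
--         "m": [symbols.index(s) for s in m_syms],
--         "n": [symbols.index(s) for s in n_syms],
--         "k": [symbols.index(s) for s in k_syms],
--     }
-- ===== SOURCE B (Python) =====
-- def _map_dim_roles(
--     symbols: list[str],
--     lhs_map: list[str],
--     rhs_map: list[str],
--     out_map: list[str],
-- ):
--     lhs_set = set(lhs_map)
--     rhs_set = set(rhs_map)
--     out_set = set(out_map)
--
--     m: list[int] = []
--     n: list[int] = []
--     k: list[int] = []
--     for i, s in enumerate(symbols):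
--         in_l, in_r, in_o = s in lhs_set, s in rhs_set, s in out_set
--         if in_l and in_r and not in_o:
--             k.append(i)
--         elif in_o and in_l and not in_r:
--             m.append(i)
--         elif in_o and in_r and not in_l:
--             n.append(i)
--     return {"m": m, "n": n, "k": k}
-- ===== Notes on version B (the rewrite author's own statement) =====
-- stated objective: simpler
-- what changed: Replaced A's three set-intersection/difference constructions with per-role sorted(key=symbols.index) plus an index-remapping comprehension by one pass over enumerate(symbols) that classifies each position directly, so indices come out already in order and no sort or repeated .index scan is needed.
import Mathlib
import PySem

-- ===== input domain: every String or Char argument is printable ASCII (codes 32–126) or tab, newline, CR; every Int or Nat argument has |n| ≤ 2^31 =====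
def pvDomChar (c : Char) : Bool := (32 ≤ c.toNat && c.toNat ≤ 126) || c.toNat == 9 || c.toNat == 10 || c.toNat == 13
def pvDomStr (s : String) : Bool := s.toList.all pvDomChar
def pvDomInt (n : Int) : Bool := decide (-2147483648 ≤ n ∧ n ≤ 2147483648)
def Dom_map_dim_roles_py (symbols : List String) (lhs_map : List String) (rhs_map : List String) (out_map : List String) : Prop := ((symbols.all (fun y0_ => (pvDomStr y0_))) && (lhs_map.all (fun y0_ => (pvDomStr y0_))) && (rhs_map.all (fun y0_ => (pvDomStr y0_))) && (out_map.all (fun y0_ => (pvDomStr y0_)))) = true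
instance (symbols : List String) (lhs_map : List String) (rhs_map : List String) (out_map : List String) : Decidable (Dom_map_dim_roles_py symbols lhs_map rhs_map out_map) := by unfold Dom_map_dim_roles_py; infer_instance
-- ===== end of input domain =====

-- B replaces A's three sorted(set-ops, key=symbols.index) lists plus index-remapping comprehensions
-- by one classifying pass over enumerate(symbols) (objective: simpler).

-- ===== PORT A =====
def map_dim_roles_py (symbols : List String) (lhs_map : List String) (rhs_map : List String) (out_map : List String) : List (String × List Int) :=
  let lhs_set : PySem.Set String := PySem.Set.ofList lhs_map
  let rhs_set : PySem.Set String := PySem.Set.ofList rhs_map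
  let out_set : PySem.Set String := PySem.Set.ofList out_map
  -- key=symbols.index; total form is sound: Pre_ guarantees every sorted element occurs in symbols
  let key : String → Int := fun s => (((PySem.List.index? symbols s).getD 0 : Nat) : Int)
  let k_syms := PySem.List.sorted (PySem.Set.diff (PySem.Set.inter lhs_set rhs_set) out_set) key
  let m_syms := PySem.List.sorted (PySem.Set.diff (PySem.Set.inter out_set lhs_set) rhs_set) key
  let n_syms := PySem.List.sorted (PySem.Set.diff (PySem.Set.inter out_set rhs_set) lhs_set) key
  [("m", m_syms.map key), ("n", n_syms.map key), ("k", k_syms.map key)]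

-- ===== PORT B =====
def map_dim_roles_py_alt (symbols : List String) (lhs_map : List String) (rhs_map : List String) (out_map : List String) : List (String × List Int) :=
  let lhs_set : PySem.Set String := PySem.Set.ofList lhs_map
  let rhs_set : PySem.Set String := PySem.Set.ofList rhs_map
  let out_set : PySem.Set String := PySem.Set.ofList out_map
  let r := (PySem.List.enumerate symbols).foldl
    (fun (acc : List Int × List Int × List Int) p =>
      if PySem.Set.contains lhs_set p.2 && PySem.Set.contains rhs_set p.2 && !PySem.Set.contains out_set p.2 then
        (acc.1, acc.2.1, acc.2.2 ++ [p.1])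
      else if PySem.Set.contains out_set p.2 && PySem.Set.contains lhs_set p.2 && !PySem.Set.contains rhs_set p.2 then
        (acc.1 ++ [p.1], acc.2.1, acc.2.2)
      else if PySem.Set.contains out_set p.2 && PySem.Set.contains rhs_set p.2 && !PySem.Set.contains lhs_set p.2 then
        (acc.1, acc.2.1 ++ [p.1], acc.2.2)
      else acc)
    ([], [], [])
  [("m", r.1), ("n", r.2.1), ("k", r.2.2)]

-- ===== PRECONDITION & SPEC =====
-- Pre_ excludes inputs where some classified role symbol is missing from `symbols` (there A raises
-- ValueError from symbols.index) or occurs more than once in `symbols` (duplicate labels: A's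
-- set-dedup/first-index answer and B's one-index-per-occurrence answer are both defensible).
def Pre_map_dim_roles_py (symbols : List String) (lhs_map : List String) (rhs_map : List String) (out_map : List String) : Prop :=
  ∀ s ∈ lhs_map ++ rhs_map ++ out_map,
    ((s ∈ lhs_map ∧ s ∈ rhs_map ∧ s ∉ out_map) ∨
     (s ∈ out_map ∧ s ∈ lhs_map ∧ s ∉ rhs_map) ∨
     (s ∈ out_map ∧ s ∈ rhs_map ∧ s ∉ lhs_map)) → symbols.count s = 1
instance (symbols : List String) (lhs_map : List String) (rhs_map : List String) (out_map : List String) : Decidable (Pre_map_dim_roles_py symbols lhs_map rhs_map out_map) := by unfold Pre_map_dim_roles_py; infer_instance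

def pvWitness_map_dim_roles_py : List String × List String × List String × List String :=
  (["m0", "n0", "k0"], ["m0", "k0"], ["k0", "n0"], ["m0", "n0"])

def Spec_map_dim_roles_py (symbols : List String) (lhs_map : List String) (rhs_map : List String) (out_map : List String) (out : List (String × List Int)) : Prop := out = map_dim_roles_py_alt symbols lhs_map rhs_map out_map
instance (symbols : List String) (lhs_map : List String) (rhs_map : List String) (out_map : List String) (out : List (String × List Int)) : Decidable (Spec_map_dim_roles_py symbols lhs_map rhs_map out_map out) := by unfold Spec_map_dim_roles_py; infer_instance

-- ===== CLAIM (what is proved, stated in full; the proofs are below) =====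
def Claim_equal_map_dim_roles_py : Prop := ∀ (symbols : List String) (lhs_map : List String) (rhs_map : List String) (out_map : List String), Dom_map_dim_roles_py symbols lhs_map rhs_map out_map → Pre_map_dim_roles_py symbols lhs_map rhs_map out_map → Spec_map_dim_roles_py symbols lhs_map rhs_map out_map (map_dim_roles_py symbols lhs_map rhs_map out_map)

-- ===== LEMMAS AND PROOFS =====

-- If `a` occurs exactly once in `l`, its (first-occurrence) index is its position.
theorem pv_idx_unique (l : List String) (a : String) :
    ∀ (i : Nat) (hi : i < l.length), l[i] = a → l.count a = 1 →
      (PySem.List.index? l a).getD 0 = i := by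
  induction l with
  | nil => intro i hi; simp at hi
  | cons x t ih =>
    intro i hi hxa hcount
    cases i with
    | zero =>
      have hx : x = a := by simpa using hxa
      subst hx
      rw [PySem.List.index?_cons_self]
      rfl
    | succ j =>
      have hj : j < t.length := by simpa using hi
      have hta : t[j] = a := by simpa using hxa
      by_cases hx : x = a
      · exfalso
        subst hx
        have hmem : x ∈ t := hta ▸ List.getElem_mem hj
        have h1 : t.count x ≥ 1 := List.count_pos_iff.mpr hmem
        simp at hcount
        omega
      · have hcnt : t.count a = 1 := by
          have hb : (x == a) = false := by simp [hx]
          simpa [List.count_cons, hb] using hcount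
        have hrec := ih j hj hta hcnt
        rw [PySem.List.index?_cons_of_ne t hx]
        have hmem : a ∈ t := hta ▸ List.getElem_mem hj
        obtain ⟨k, hk⟩ := Option.isSome_iff_exists.mp ((PySem.List.index?_isSome_iff t a).mpr hmem)
        rw [hk] at hrec ⊢
        simp at hrec
        simp [hrec]

theorem pv_fold3 (lhs_set rhs_set out_set : List String) :
    ∀ (l : List (Int × String)) (a b c : List Int),
      l.foldl
        (fun (acc : List Int × List Int × List Int) p =>
          if PySem.Set.contains lhs_set p.2 && PySem.Set.contains rhs_set p.2 && !PySem.Set.contains out_set p.2 then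
            (acc.1, acc.2.1, acc.2.2 ++ [p.1])
          else if PySem.Set.contains out_set p.2 && PySem.Set.contains lhs_set p.2 && !PySem.Set.contains rhs_set p.2 then
            (acc.1 ++ [p.1], acc.2.1, acc.2.2)
          else if PySem.Set.contains out_set p.2 && PySem.Set.contains rhs_set p.2 && !PySem.Set.contains lhs_set p.2 then
            (acc.1, acc.2.1 ++ [p.1], acc.2.2)
          else acc)
        (a, b, c)
      = (a ++ (l.filter (fun p => PySem.Set.contains out_set p.2 && PySem.Set.contains lhs_set p.2 && !PySem.Set.contains rhs_set p.2)).map (fun p => p.1),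
         b ++ (l.filter (fun p => PySem.Set.contains out_set p.2 && PySem.Set.contains rhs_set p.2 && !PySem.Set.contains lhs_set p.2)).map (fun p => p.1),
         c ++ (l.filter (fun p => PySem.Set.contains lhs_set p.2 && PySem.Set.contains rhs_set p.2 && !PySem.Set.contains out_set p.2)).map (fun p => p.1)) := by
  intro l
  induction l with
  | nil => intro a b c; simp
  | cons p t ih =>
    intro a b c
    rw [List.foldl_cons]
    cases hl : PySem.Set.contains lhs_set p.2 <;>
      cases hr : PySem.Set.contains rhs_set p.2 <;>
        cases ho : PySem.Set.contains out_set p.2 <;>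
          (simp only [hl, hr, ho, Bool.and_false, Bool.and_true,
              Bool.not_false, Bool.not_true, if_true, if_false, Bool.false_eq_true,
              List.filter_cons, List.map_cons]; rw [ih]; try simp)

-- the positions of the P-suffix elements, in order, are the indices i with P symbols[i]
theorem pv_enum_filter_aux (symbols : List String) (P : String → Bool) (key : String → Int)
    (hkey : ∀ (j : Nat) (hj : j < symbols.length), P symbols[j] = true → key symbols[j] = (j : Int)) :
    ∀ (t : List String) (i : Nat), symbols.drop i = t →
      ((PySem.List.enumerate t (i : Int)).filter (fun p => P p.2)).map (fun p => p.1)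
        = (t.filter P).map key := by
  intro t
  induction t with
  | nil => intro i _; simp [PySem.List.enumerate_nil]
  | cons x u ih =>
    intro i hdrop
    have hi : i < symbols.length := by
      by_contra h
      rw [List.drop_eq_nil_of_le (by omega)] at hdrop
      exact List.cons_ne_nil _ _ hdrop.symm
    have hx : symbols[i]'hi = x := by
      have h0 : (symbols.drop i)[0]'(by simp [hdrop]) = x := by simp [hdrop]
      rwa [List.getElem_drop] at h0
    have hu : symbols.drop (i + 1) = u := by
      rw [← List.tail_drop, hdrop]; rfl
    have hrec := ih (i + 1) hu
    rw [PySem.List.enumerate_cons]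
    have hcast : ((i : Int) + 1) = ((i + 1 : Nat) : Int) := by push_cast; ring
    rw [hcast]
    by_cases hPx : P x = true
    · have hk : key x = (i : Int) := by
        have := hkey i hi (by rw [hx]; exact hPx)
        rwa [hx] at this
      simp [hPx, hk]
      exact_mod_cast hrec
    · have hPx' : P x = false := by simpa using hPx
      simp [hPx']
      exact_mod_cast hrec

-- core: A's per-role list equals B's per-role filter over enumerate(symbols)
theorem pv_role_eq (symbols : List String) (P : String → Bool) (S : List String)
    (hS : ∀ s, s ∈ S ↔ P s = true) (hnd : S.Nodup)
    (hc : ∀ s, P s = true → symbols.count s = 1) :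
    (PySem.List.sorted S (fun s => (((PySem.List.index? symbols s).getD 0 : Nat) : Int))).map
        (fun s => (((PySem.List.index? symbols s).getD 0 : Nat) : Int))
      = ((PySem.List.enumerate symbols).filter (fun p => P p.2)).map (fun p => p.1) := by
  set key : String → Int := fun s => (((PySem.List.index? symbols s).getD 0 : Nat) : Int) with hkeydef
  have hmemP : ∀ s, P s = true → s ∈ symbols := by
    intro s hs
    exact List.count_pos_iff.mp (by rw [hc s hs]; norm_num)
  have hkey : ∀ (j : Nat) (hj : j < symbols.length), P symbols[j] = true → key symbols[j] = (j : Int) := by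
    intro j hj hP
    have h0 := pv_idx_unique symbols (symbols[j]'hj) j hj rfl (hc _ hP)
    rw [PySem.List.index?_eq_idxOf?] at h0
    simp [hkeydef, h0]
  have hFnd : (symbols.filter P).Nodup := by
    rw [List.nodup_iff_count_le_one]
    intro a
    by_cases hPa : P a = true
    · rw [List.count_filter hPa, hc a hPa]
    · have : a ∉ symbols.filter P := by
        intro hmem
        exact hPa (List.of_mem_filter hmem)
      simp [List.count_eq_zero.mpr this]
  have hpairSym : symbols.Pairwise (fun a b => P a = true → P b = true → key a < key b) := by
    rw [List.pairwise_iff_getElem]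
    intro i j hi hj hij hPi hPj
    rw [hkey i hi hPi, hkey j hj hPj]
    exact_mod_cast hij
  have hpair : (symbols.filter P).Pairwise (fun a b => key a < key b) := by
    refine List.Pairwise.imp_of_mem ?_ (List.Pairwise.sublist List.filter_sublist hpairSym)
    intro a b ha hb h
    exact h (List.of_mem_filter ha) (List.of_mem_filter hb)
  have hperm : (symbols.filter P).Perm S := by
    rw [List.perm_ext_iff_of_nodup hFnd hnd]
    intro a
    rw [List.mem_filter, hS a]
    constructor
    · exact fun h => h.2
    · exact fun h => ⟨hmemP a h, h⟩
  have hsorted : PySem.List.sorted S key = symbols.filter P :=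
    PySem.List.sorted_eq_of_perm_of_pairwise_lt S (symbols.filter P) key hperm hpair
  rw [hsorted]
  exact (pv_enum_filter_aux symbols P key hkey symbols 0 (by simp)).symm

theorem pv_contains_iff' (xs : List String) (s : String) :
    PySem.Set.contains (PySem.Set.ofList xs) s = true ↔ s ∈ xs := by
  rw [PySem.Set.contains_iff, PySem.Set.mem_ofList]

-- ===== VERDICT (by name: the statement is the Claim_ definition above) =====
theorem map_dim_roles_py_spec : Claim_equal_map_dim_roles_py := by
  unfold Claim_equal_map_dim_roles_py
  intro symbols lhs_map rhs_map out_map _hDom hPre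
  unfold Spec_map_dim_roles_py
  unfold map_dim_roles_py map_dim_roles_py_alt
  simp only []
  rw [pv_fold3]
  set L := PySem.Set.ofList lhs_map with hL
  set R := PySem.Set.ofList rhs_map with hR
  set O := PySem.Set.ofList out_map with hO
  have hcK : ∀ s, (PySem.Set.contains L s && PySem.Set.contains R s && !PySem.Set.contains O s) = true → symbols.count s = 1 := by
    intro s h
    simp only [Bool.and_eq_true, Bool.not_eq_true'] at h
    have h1 := (pv_contains_iff' lhs_map s).mp h.1.1
    have h2 := (pv_contains_iff' rhs_map s).mp h.1.2
    have h3 : s ∉ out_map := by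
      intro hmem
      rw [← pv_contains_iff' out_map s] at hmem
      rw [h.2] at hmem
      exact Bool.false_ne_true hmem
    exact hPre s (by simp [h1]) (Or.inl ⟨h1, h2, h3⟩)
  have hcM : ∀ s, (PySem.Set.contains O s && PySem.Set.contains L s && !PySem.Set.contains R s) = true → symbols.count s = 1 := by
    intro s h
    simp only [Bool.and_eq_true, Bool.not_eq_true'] at h
    have h1 := (pv_contains_iff' out_map s).mp h.1.1
    have h2 := (pv_contains_iff' lhs_map s).mp h.1.2
    have h3 : s ∉ rhs_map := by
      intro hmem
      rw [← pv_contains_iff' rhs_map s] at hmem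
      rw [h.2] at hmem
      exact Bool.false_ne_true hmem
    exact hPre s (by simp [h2]) (Or.inr (Or.inl ⟨h1, h2, h3⟩))
  have hcN : ∀ s, (PySem.Set.contains O s && PySem.Set.contains R s && !PySem.Set.contains L s) = true → symbols.count s = 1 := by
    intro s h
    simp only [Bool.and_eq_true, Bool.not_eq_true'] at h
    have h1 := (pv_contains_iff' out_map s).mp h.1.1
    have h2 := (pv_contains_iff' rhs_map s).mp h.1.2
    have h3 : s ∉ lhs_map := by
      intro hmem
      rw [← pv_contains_iff' lhs_map s] at hmem
      rw [h.2] at hmem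
      exact Bool.false_ne_true hmem
    exact hPre s (by simp [h2]) (Or.inr (Or.inr ⟨h1, h2, h3⟩))
  have hndL : (PySem.Set.ofList lhs_map).Nodup := PySem.Set.nodup_ofList lhs_map
  have hndO : (PySem.Set.ofList out_map).Nodup := PySem.Set.nodup_ofList out_map
  simp only [List.nil_append, List.cons.injEq, Prod.mk.injEq, and_true, true_and]
  refine ⟨?_, ?_, ?_⟩
  · -- "m"
    exact pv_role_eq symbols _ (PySem.Set.diff (PySem.Set.inter O L) R)
      (by
        intro s
        rw [PySem.Set.mem_diff, PySem.Set.mem_inter]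
        simp only [Bool.and_eq_true, Bool.not_eq_true']
        rw [PySem.Set.contains_iff, PySem.Set.contains_iff, ← Bool.not_eq_true, PySem.Set.contains_iff]
        try tauto)
      (PySem.Set.nodup_diff _ _ (PySem.Set.nodup_inter _ _ hndO)) hcM
  · -- "n"
    exact pv_role_eq symbols _ (PySem.Set.diff (PySem.Set.inter O R) L)
      (by
        intro s
        rw [PySem.Set.mem_diff, PySem.Set.mem_inter]
        simp only [Bool.and_eq_true, Bool.not_eq_true']
        rw [PySem.Set.contains_iff, PySem.Set.contains_iff, ← Bool.not_eq_true, PySem.Set.contains_iff]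
        try tauto)
      (PySem.Set.nodup_diff _ _ (PySem.Set.nodup_inter _ _ hndO)) hcN
  · -- "k"
    exact pv_role_eq symbols _ (PySem.Set.diff (PySem.Set.inter L R) O)
      (by
        intro s
        rw [PySem.Set.mem_diff, PySem.Set.mem_inter]
        simp only [Bool.and_eq_true, Bool.not_eq_true']
        rw [PySem.Set.contains_iff, PySem.Set.contains_iff, ← Bool.not_eq_true, PySem.Set.contains_iff]
        try tauto)
      (PySem.Set.nodup_diff _ _ (PySem.Set.nodup_inter _ _ hndL)) hcK
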